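-- pv_equiv track=rewrite | github.com/davewalker5/NetworkCalculator | src/ipv4/ipv4_subnet.py | calculate_for_networks
-- ===== SOURCE A (Python) =====
-- def calculate_for_networks(network_bits, number_of_networks):
--     """
--     Given a number of networks and current network bits, calculate the number of network bits and subnet
--     bits required to accommodate that many subnets
--
--     :param network_bits: Current number of network bits
--     :param number_of_networks: Number of subnets required
--     :return: Tuple of the number of network bits and subnet bits
--     """
--     number_of_subnet_bits = 0
--     new_network_bits = 0
--
--     for n in range(0, 32):
--         number_of_networks_for_n = pow(2, n)
--         if number_of_networks_for_n >= number_of_networks: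
--             number_of_subnet_bits = n
--             new_network_bits = network_bits + n
--             break
--
--     return new_network_bits, number_of_subnet_bits
-- ===== SOURCE B (Python) =====
-- def calculate_for_networks(network_bits, number_of_networks):
--     """Closed-form: smallest n with 2**n >= number_of_networks via bit_length."""
--     if number_of_networks <= 1:
--         n = 0
--     else:
--         n = (number_of_networks - 1).bit_length()
--     return network_bits + n, n
-- ===== Notes on version B (the rewrite author's own statement) =====
-- stated objective: idiomatic
-- what changed: Replaces the 0..31 linear scan over powers of two with a one-step closed form using int.bit_length.
import Mathlib
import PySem

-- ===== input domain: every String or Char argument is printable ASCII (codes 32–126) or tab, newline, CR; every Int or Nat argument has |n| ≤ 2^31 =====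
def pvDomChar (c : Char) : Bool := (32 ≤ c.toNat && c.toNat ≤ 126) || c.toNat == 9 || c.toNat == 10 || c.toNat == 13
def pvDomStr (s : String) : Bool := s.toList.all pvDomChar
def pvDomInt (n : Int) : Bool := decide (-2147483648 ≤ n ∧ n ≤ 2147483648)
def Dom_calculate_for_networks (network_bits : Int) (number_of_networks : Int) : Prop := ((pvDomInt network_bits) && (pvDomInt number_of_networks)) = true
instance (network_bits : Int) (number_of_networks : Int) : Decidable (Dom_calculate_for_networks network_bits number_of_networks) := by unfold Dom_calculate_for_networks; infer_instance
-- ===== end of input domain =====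

-- B computes the subnet-bit count in one closed-form step via bit_length instead of A's
-- linear scan over powers of two (objective: idiomatic).

-- ===== PORT A =====
-- For-loop with break over range(0, 32); falls off the loop (keeping the 0/0 initials)
-- when no n in 0..31 satisfies 2^n >= number_of_networks.
def calcA_loop (network_bits : Int) (number_of_networks : Int) : List Int → Int × Int
  | [] => (0, 0)
  | n :: rest =>
      -- pow(2, n): n is a nonnegative range element, so 2^n.toNat is exact here
      if (2 : Int) ^ n.toNat ≥ number_of_networks then (network_bits + n, n)
      else calcA_loop network_bits number_of_networks rest

def calculate_for_networks (network_bits : Int) (number_of_networks : Int) : Int × Int :=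
  calcA_loop network_bits number_of_networks (PySem.List.pyRange 0 32 1)

-- ===== PORT B =====
def calculate_for_networks_alt (network_bits : Int) (number_of_networks : Int) : Int × Int :=
  let n : Int :=
    if number_of_networks ≤ 1 then 0
    else (PySem.Int.bitLength (number_of_networks - 1) : Int)
  (network_bits + n, n)

-- ===== PRECONDITION & SPEC =====
def Spec_calculate_for_networks (network_bits : Int) (number_of_networks : Int) (out : Int × Int) : Prop := out = calculate_for_networks_alt network_bits number_of_networks
instance (network_bits : Int) (number_of_networks : Int) (out : Int × Int) : Decidable (Spec_calculate_for_networks network_bits number_of_networks out) := by unfold Spec_calculate_for_networks; infer_instance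

-- ===== CLAIM (what is proved, stated in full; the proofs are below) =====
def Claim_equal_calculate_for_networks : Prop := ∀ (network_bits : Int) (number_of_networks : Int), Dom_calculate_for_networks network_bits number_of_networks → Spec_calculate_for_networks network_bits number_of_networks (calculate_for_networks network_bits number_of_networks)

-- ===== LEMMAS AND PROOFS =====

-- The loop over the suffix of range(0,32) starting at j returns (nb + k, k) when k is the
-- first success: every earlier exponent fails and 2^k ≥ N.
lemma calcA_loop_range' (network_bits N : Int) (k : Nat)
    (hsucc : N ≤ (2 : Int) ^ k)
    (hfail : ∀ j : Nat, j < k → (2 : Int) ^ j < N) :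
    ∀ (len j : Nat), j ≤ k → k < j + len →
      calcA_loop network_bits N ((List.range' j len).map (Nat.cast : Nat → Int)) =
        (network_bits + (k : Int), (k : Int)) := by
  intro len
  induction len with
  | zero => intro j h1 h2; omega
  | succ m ih =>
    intro j h1 h2
    rw [List.range'_succ, List.map_cons]
    by_cases hjk : j = k
    · subst hjk
      simp only [calcA_loop, Int.toNat_natCast]
      rw [if_pos (by exact_mod_cast hsucc)]
    · have hlt : j < k := lt_of_le_of_ne h1 hjk
      simp only [calcA_loop, Int.toNat_natCast]
      rw [if_neg (by exact not_le.mpr (hfail j hlt)), ih (j + 1) (by omega) (by omega)]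

lemma pyRange_0_32 : PySem.List.pyRange 0 32 1 = (List.range' 0 32).map (Nat.cast : Nat → Int) := by
  decide

-- ===== VERDICT (by name: the statement is the Claim_ definition above) =====
theorem calculate_for_networks_spec : Claim_equal_calculate_for_networks := by
  intro nb N hDom
  have hN : N ≤ 2147483648 := by
    simp only [Dom_calculate_for_networks, pvDomInt, Bool.and_eq_true, decide_eq_true_eq] at hDom
    exact hDom.2.2
  unfold Spec_calculate_for_networks calculate_for_networks calculate_for_networks_alt
  by_cases h1 : N ≤ 1
  · rw [if_pos h1, pyRange_0_32]
    have h32 : (List.range' 0 32).map (Nat.cast : Nat → Int) =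
        (0 : Int) :: (List.range' 1 31).map (Nat.cast : Nat → Int) := by decide
    rw [h32]
    simp only [calcA_loop]
    rw [if_pos (by simpa using h1)]
  · rw [if_neg h1]
    have h1 : 1 < N := not_le.mp h1
    set k : Nat := PySem.Int.bitLength (N - 1) with hk
    have hne : N - 1 ≠ 0 := by omega
    have hlow : (2 : ℤ) ^ (k - 1) ≤ (N - 1).natAbs :=
      by exact_mod_cast PySem.Int.two_pow_bitLength_le (N - 1) hne
    have habs : ((N - 1).natAbs : Int) = N - 1 := Int.natAbs_of_nonneg (by omega)
    rw [habs] at hlow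
    have hhigh : ((N - 1).natAbs : Int) < (2 : Int) ^ k := by
      exact_mod_cast PySem.Int.lt_two_pow_bitLength (N - 1)
    rw [habs] at hhigh
    have hsucc : N ≤ (2 : Int) ^ k := by omega
    have hkpos : 1 ≤ k := by
      by_contra h
      have : k = 0 := by omega
      rw [this] at hhigh
      simp at hhigh; omega
    have hk31 : k ≤ 31 := by
      by_contra h
      have h231 : (2 : Int) ^ 31 ≤ (2 : Int) ^ (k - 1) :=
        pow_le_pow_right₀ (by norm_num) (by omega)
      have : (2 : Int) ^ 31 = 2147483648 := by norm_num
      omega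
    have hfail : ∀ j : Nat, j < k → (2 : Int) ^ j < N := by
      intro j hj
      have : (2 : Int) ^ j ≤ (2 : Int) ^ (k - 1) :=
        pow_le_pow_right₀ (by norm_num) (by omega)
      omega
    rw [pyRange_0_32, calcA_loop_range' nb N k hsucc hfail 32 0 (by omega) (by omega)]
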